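-- pv_equiv track=rewrite | github.com/boba-buba/university_1_semester | cernovik.py | remize
-- ===== SOURCE A (Python) =====
-- def proverka(pole, m, n, znak):
--     for i in range(len(pole[0])):
--         count = 0
--         for j in range(i, len(pole[0])):
--             if pole[m][j] == znak:
--                 count += 1
--                 if count == 5: return False
--     for i in range(len(pole)):
--         count = 0
--         for j in range(i, len(pole)):
--             if pole[j][n] == znak:
--                 count += 1
--                 if count == 5: return False
--
--     delka = min(len(pole[0]), len(pole))
--     for i in range(delka):
--         count = 0
--         for j in range(i, delka):
--             if pole[i][i] == znak:
--                 count += 1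
--                 if count == 5: return False
--
--     count = 0
--     i = m - 1; j = n + 1
--     while i >= 0 and j < n:
--         if pole[i][j] == znak:
--             count+=1
--             if count == 5: return False
--         i -= 1; j += 1
--     return True
--
-- def remize(r,s):
--     deska = [[ "_" for l in range(s)] for k in range(r)]
--     i = 0; j = 0
--     for i in range(r):
--         for j in range(s):
--             deska[i][j] = "O"
--             if not proverka(deska, i, j, "O"):
--                 deska[i][j] = "X"
--
--     return deska
-- ===== SOURCE B (Python) =====
-- def _blocked(pole, m, n):
--     # row of the current cell already holds five "O"s?
--     if pole[m].count("O") >= 5: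
--         return True
--     # column of the current cell already holds five "O"s?
--     if [row[n] for row in pole].count("O") >= 5:
--         return True
--     # A's (quirky) diagonal test: it re-reads the constant cell pole[i][i],
--     # so it fires exactly when some pole[i][i] == "O" with i <= delka - 5.
--     delka = min(len(pole[0]), len(pole))
--     return any(pole[i][i] == "O" for i in range(delka - 4))
--
-- def remize(r, s):
--     deska = [["_" for l in range(s)] for k in range(r)]
--     for i in range(r):
--         for j in range(s):
--             deska[i][j] = "O"
--             if _blocked(deska, i, j):
--                 deska[i][j] = "X"
--     return deska
-- ===== Notes on version B (the rewrite author's own statement) =====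
-- stated objective: simpler
-- what changed: proverka's three nested counting loops (quadratic per check, plus a dead anti-diagonal while loop) are replaced by direct list.count thresholds for the row and column and a single any() scan over the diagonal; the dead loop is dropped.
import Mathlib
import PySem

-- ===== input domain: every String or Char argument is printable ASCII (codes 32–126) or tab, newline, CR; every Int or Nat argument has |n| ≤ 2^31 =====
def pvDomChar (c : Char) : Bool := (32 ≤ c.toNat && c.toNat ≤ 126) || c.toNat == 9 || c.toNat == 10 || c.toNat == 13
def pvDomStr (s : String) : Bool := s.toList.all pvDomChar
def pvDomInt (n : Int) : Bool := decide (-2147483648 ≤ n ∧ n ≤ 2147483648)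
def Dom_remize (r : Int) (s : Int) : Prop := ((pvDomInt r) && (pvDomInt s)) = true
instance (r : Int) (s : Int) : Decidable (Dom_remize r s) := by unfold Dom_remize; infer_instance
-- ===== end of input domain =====

-- Program-equivalence file: B replaces A's nested counting loops in the board check
-- by direct count thresholds and a single diagonal scan (objective: simpler).


-- ===== PORT A =====
-- inner counting loop 'count = 0; for j in range(i, cols): if row[j] == znak: count += 1; if count == 5: return False'
-- (used verbatim for the row pass and, with the extracted column list, for the column pass)
def pvRowInner (row : List String) (znak : String) (cols j count : Nat) : Bool :=
  if h : j < cols then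
    if row.getD j "" == znak then
      if count + 1 == 5 then false
      else pvRowInner row znak cols (j+1) (count+1)
    else pvRowInner row znak cols (j+1) count
  else true
termination_by cols - j

def pvRowOuter (row : List String) (znak : String) (cols i : Nat) : Bool :=
  if h : i < cols then
    if pvRowInner row znak cols i 0 then pvRowOuter row znak cols (i+1) else false
  else true
termination_by cols - i

-- diagonal loops: the inner loop re-reads the constant cell pole[i][i]
def pvDiagInner (pole : List (List String)) (znak : String) (i delka j count : Nat) : Bool :=
  if h : j < delka then
    if (pole.getD i []).getD i "" == znak then
      if count + 1 == 5 then false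
      else pvDiagInner pole znak i delka (j+1) (count+1)
    else pvDiagInner pole znak i delka (j+1) count
  else true
termination_by delka - j

def pvDiagOuter (pole : List (List String)) (znak : String) (delka i : Nat) : Bool :=
  if h : i < delka then
    if pvDiagInner pole znak i delka i 0 then pvDiagOuter pole znak delka (i+1) else false
  else true
termination_by delka - i

-- 'while i >= 0 and j < n: …' anti-diagonal loop (its entry condition is never true: j starts at n+1)
def pvAnti (pole : List (List String)) (znak : String) (count : Nat) (n i j : Int) : Bool :=
  if h : 0 ≤ i ∧ j < n then
    if (pole.getD i.toNat []).getD j.toNat "" == znak then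
      if count + 1 == 5 then false
      else pvAnti pole znak (count+1) n (i-1) (j+1)
    else pvAnti pole znak count n (i-1) (j+1)
  else true
termination_by (i+1).toNat
decreasing_by all_goals · have := h.1; omega

-- indices are always in range at every call site remize makes, so getD with a junk default is exact there
def proverka (pole : List (List String)) (m n : Int) (znak : String) : Bool :=
  let cols := (pole.getD 0 []).length
  if !(pvRowOuter (pole.getD m.toNat []) znak cols 0) then false
  else if !(pvRowOuter (pole.map (fun row => row.getD n.toNat "")) znak pole.length 0) then false
  else
    let delka := min cols pole.length
    if !(pvDiagOuter pole znak delka 0) then false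
    else pvAnti pole znak 0 n (m-1) (n+1)

-- 'deska[i][j] = v'
def pvSetCell (deska : List (List String)) (i j : Nat) (v : String) : List (List String) :=
  deska.set i ((deska.getD i []).set j v)

def remize (r : Int) (s : Int) : List (List String) :=
  let deska := (PySem.List.pyRange 0 r 1).map (fun _ => (PySem.List.pyRange 0 s 1).map (fun _ => "_"))
  (PySem.List.pyRange 0 r 1).foldl (fun d i =>
    (PySem.List.pyRange 0 s 1).foldl (fun d j =>
      let d1 := pvSetCell d i.toNat j.toNat "O"
      if !(proverka d1 i j "O") then pvSetCell d1 i.toNat j.toNat "X" else d1) d) deska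

-- ===== PORT B =====
def pvBlocked (pole : List (List String)) (m n : Int) : Bool :=
  if 5 ≤ (pole.getD m.toNat []).count "O" then true
  else if 5 ≤ (pole.map (fun row => row.getD n.toNat "")).count "O" then true
  else
    let delka := min (pole.getD 0 []).length pole.length
    (List.range (delka - 4)).any (fun i => (pole.getD i []).getD i "" == "O")

def remize_alt (r : Int) (s : Int) : List (List String) :=
  let deska := (PySem.List.pyRange 0 r 1).map (fun _ => (PySem.List.pyRange 0 s 1).map (fun _ => "_"))
  (PySem.List.pyRange 0 r 1).foldl (fun d i =>
    (PySem.List.pyRange 0 s 1).foldl (fun d j =>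
      let d1 := pvSetCell d i.toNat j.toNat "O"
      if pvBlocked d1 i j then pvSetCell d1 i.toNat j.toNat "X" else d1) d) deska

-- ===== PRECONDITION & SPEC =====
def Spec_remize (r : Int) (s : Int) (out : List (List String)) : Prop := out = remize_alt r s
instance (r : Int) (s : Int) (out : List (List String)) : Decidable (Spec_remize r s out) := by unfold Spec_remize; infer_instance

-- ===== CLAIM (what is proved, stated in full; the proofs are below) =====
def Claim_equal_remize : Prop := ∀ (r : Int) (s : Int), Dom_remize r s → Spec_remize r s (remize r s)

-- ===== LEMMAS AND PROOFS =====

lemma pvRowInner_false_iff (row : List String) (znak : String) (cols : Nat) (hlen : row.length = cols) :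
    ∀ j count, count < 5 → (pvRowInner row znak cols j count = false ↔ 5 ≤ count + (row.drop j).count znak) := by
  suffices h : ∀ k j count, cols - j ≤ k → count < 5 →
      (pvRowInner row znak cols j count = false ↔ 5 ≤ count + (row.drop j).count znak) from
    fun j c hc => h (cols - j) j c le_rfl hc
  intro k
  induction k with
  | zero =>
    intro j count hk hc
    rw [pvRowInner, dif_neg (by omega)]
    have hnil : row.drop j = [] := List.drop_eq_nil_of_le (by omega)
    simp [hnil]; omega
  | succ k ih =>
    intro j count hk hc
    by_cases hj : j < cols
    · have hjl : j < row.length := by omega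
      have hd : row.drop j = row[j] :: row.drop (j+1) := List.drop_eq_getElem_cons hjl
      have hg : row.getD j "" = row[j] := List.getD_eq_getElem row "" hjl
      rw [pvRowInner, dif_pos hj, hg, hd]
      by_cases heq : row[j] = znak
      · rw [if_pos (by simp [heq])]
        by_cases h5 : count + 1 = 5
        · rw [if_pos (by simp [h5]), List.count_cons, heq, if_pos (beq_self_eq_true znak)]
          simp
          omega
        · rw [if_neg (by simp; omega), ih (j+1) (count+1) (by omega) (by omega), List.count_cons]
          have : (znak == znak) = true := beq_self_eq_true znak
          rw [heq, this, if_pos rfl]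
          omega
      · rw [if_neg (by simp [heq]), ih (j+1) count (by omega) hc, List.count_cons]
        rw [if_neg (by simpa using heq)]
        simp
    · rw [pvRowInner, dif_neg hj]
      have hnil : row.drop j = [] := List.drop_eq_nil_of_le (by omega)
      simp [hnil]; omega

lemma pvRowOuter_eq (row : List String) (znak : String) (cols : Nat) (hlen : row.length = cols) :
    pvRowOuter row znak cols 0 = decide (row.count znak < 5) := by
  by_cases h5 : 5 ≤ row.count znak
  · have hpos : 0 < cols := by
      rcases row with _ | ⟨a, t⟩
      · simp at h5
      · simp at hlen; omega
    rw [pvRowOuter, dif_pos hpos]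
    have : pvRowInner row znak cols 0 0 = false := by
      rw [pvRowInner_false_iff row znak cols hlen 0 0 (by omega)]
      simpa using h5
    rw [this]
    simp; omega
  · have hall : ∀ k i, cols - i ≤ k → pvRowOuter row znak cols i = true := by
      intro k
      induction k with
      | zero => intro i hk; rw [pvRowOuter, dif_neg (by omega)]
      | succ k ih =>
        intro i hk
        by_cases hi : i < cols
        · have hinner : pvRowInner row znak cols i 0 = true := by
            cases hx : pvRowInner row znak cols i 0 with
            | true => rfl
            | false =>
              exfalso
              rw [pvRowInner_false_iff row znak cols hlen i 0 (by omega)] at hx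
              have := (List.drop_sublist i row).count_le znak
              omega
          rw [pvRowOuter, dif_pos hi, hinner]
          simp only [if_true]
          exact ih (i+1) (by omega)
        · rw [pvRowOuter, dif_neg hi]
    rw [hall cols 0 (by omega)]
    simp; omega

lemma pvDiagInner_false_iff (pole : List (List String)) (znak : String) (i delka : Nat) :
    ∀ j count, count < 5 →
      (pvDiagInner pole znak i delka j count = false ↔
        ((pole.getD i []).getD i "" == znak) = true ∧ 5 ≤ count + (delka - j)) := by
  suffices h : ∀ f j count, delka - j ≤ f → count < 5 →
      (pvDiagInner pole znak i delka j count = false ↔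
        ((pole.getD i []).getD i "" == znak) = true ∧ 5 ≤ count + (delka - j)) from
    fun j c hc => h (delka - j) j c le_rfl hc
  intro f
  induction f with
  | zero =>
    intro j count hf hc
    rw [pvDiagInner, dif_neg (by omega)]
    simp
    intro _
    omega
  | succ f ih =>
    intro j count hf hc
    by_cases hj : j < delka
    · rw [pvDiagInner, dif_pos hj]
      by_cases hacc : ((pole.getD i []).getD i "" == znak) = true
      · rw [if_pos hacc]
        by_cases h5 : count + 1 = 5
        · rw [if_pos (by simp [h5])]
          constructor
          · intro _
            exact ⟨hacc, by omega⟩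
          · intro _
            rfl
        · rw [if_neg (by simp; omega), ih (j+1) (count+1) (by omega) (by omega)]
          simp only [hacc, true_and]
          omega
      · rw [if_neg hacc, ih (j+1) count (by omega) hc]
        exact ⟨fun h => absurd h.1 hacc, fun h => absurd h.1 hacc⟩
    · rw [pvDiagInner, dif_neg hj]
      simp
      intro _
      omega

lemma pvDiagOuter_false_iff (pole : List (List String)) (znak : String) (delka : Nat) :
    ∀ i, (pvDiagOuter pole znak delka i = false ↔
      ∃ k, i ≤ k ∧ k + 5 ≤ delka ∧ ((pole.getD k []).getD k "" == znak) = true) := by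
  suffices h : ∀ f i, delka - i ≤ f →
      (pvDiagOuter pole znak delka i = false ↔
        ∃ k, i ≤ k ∧ k + 5 ≤ delka ∧ ((pole.getD k []).getD k "" == znak) = true) from
    fun i => h (delka - i) i le_rfl
  intro f
  induction f with
  | zero =>
    intro i hf
    rw [pvDiagOuter, dif_neg (by omega)]
    simp
    intro k hik h5k
    exact absurd h5k (by omega)
  | succ f ih =>
    intro i hf
    by_cases hi : i < delka
    · rw [pvDiagOuter, dif_pos hi]
      cases hx : pvDiagInner pole znak i delka i 0 with
      | false =>
        have hx' := hx
        rw [pvDiagInner_false_iff pole znak i delka i 0 (by omega)] at hx'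
        simp only [Bool.false_eq_true, if_false]
        constructor
        · intro _
          exact ⟨i, le_rfl, by omega, hx'.1⟩
        · intro _
          trivial
      | true =>
        have hnot : ¬(((pole.getD i []).getD i "" == znak) = true ∧ 5 ≤ 0 + (delka - i)) := by
          intro hcontr
          rw [← pvDiagInner_false_iff pole znak i delka i 0 (by omega)] at hcontr
          rw [hx] at hcontr
          exact Bool.noConfusion hcontr
        simp only [if_true]
        rw [ih (i+1) (by omega)]
        constructor
        · rintro ⟨k, hik, h5k, hacck⟩
          exact ⟨k, by omega, h5k, hacck⟩
        · rintro ⟨k, hik, h5k, hacck⟩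
          refine ⟨k, ?_, h5k, hacck⟩
          rcases Nat.eq_or_lt_of_le hik with heq | hlt
          · exfalso
            exact hnot ⟨by rw [← heq] at hacck; exact hacck, by omega⟩
          · omega
    · rw [pvDiagOuter, dif_neg hi]
      simp
      intro k hik h5k
      exact absurd h5k (by omega)

lemma pvAnti_start (pole : List (List String)) (znak : String) (n m : Int) :
    pvAnti pole znak 0 n (m-1) (n+1) = true := by
  rw [pvAnti, dif_neg (by omega : ¬(0 ≤ m-1 ∧ n+1 < n))]

-- thecentral  pointwise lemma: on a nonempty rectangular board with in-range indices the two checks agree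
lemma proverka_eq_not_blocked (pole : List (List String)) (m n : Int) (cols : Nat)
    (hcols : (pole.getD 0 []).length = cols)
    (hrect : ∀ row ∈ pole, row.length = cols)
    (hm : m.toNat < pole.length) (_hn : n.toNat < cols) :
    proverka pole m n "O" = !(pvBlocked pole m n) := by
  have hmem : pole.getD m.toNat [] ∈ pole := by
    rw [List.getD_eq_getElem _ _ hm]
    exact List.getElem_mem hm
  have hrowlen : (pole.getD m.toNat []).length = cols := hrect _ hmem
  have hrow := pvRowOuter_eq (pole.getD m.toNat []) "O" cols hrowlen
  have hcol := pvRowOuter_eq (pole.map (fun row => row.getD n.toNat "")) "O" pole.length (by simp)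
  have hany : ((List.range (min cols pole.length - 4)).any
        (fun i => (pole.getD i []).getD i "" == "O") = true)
      ↔ ∃ k, k + 5 ≤ min cols pole.length ∧ ((pole.getD k []).getD k "" == "O") = true := by
    rw [List.any_eq_true]
    constructor
    · rintro ⟨k, hk, hacc⟩
      rw [List.mem_range] at hk
      exact ⟨k, by omega, hacc⟩
    · rintro ⟨k, hk, hacc⟩
      exact ⟨k, List.mem_range.mpr (by omega), hacc⟩
  have hdiag := pvDiagOuter_false_iff pole "O" (min cols pole.length) 0
  simp only [proverka, pvBlocked, hcols]
  rw [hrow, hcol]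
  by_cases h1 : 5 ≤ (pole.getD m.toNat []).count "O"
  · simp only [List.getD_eq_getElem?_getD] at h1
    simp [h1]
  · by_cases h2 : 5 ≤ (List.map (fun row => row.getD n.toNat "") pole).count "O"
    · simp only [List.getD_eq_getElem?_getD] at h1 h2
      simp [h1, h2]
    · cases hx : pvDiagOuter pole "O" (min cols pole.length) 0 with
      | false =>
        have hblk : (List.range (min cols pole.length - 4)).any
            (fun i => (pole.getD i []).getD i "" == "O") = true := by
          rcases hdiag.mp hx with ⟨k, _, h5k, hacck⟩
          exact hany.mpr ⟨k, h5k, hacck⟩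
        simp only [List.getD_eq_getElem?_getD] at h1 h2 hblk
        simp [h1, h2, hblk]
      | true =>
        have hblk : (List.range (min cols pole.length - 4)).any
            (fun i => (pole.getD i []).getD i "" == "O") = false := by
          cases hy : (List.range (min cols pole.length - 4)).any
              (fun i => (pole.getD i []).getD i "" == "O") with
          | false => rfl
          | true =>
            exfalso
            rcases hany.mp hy with ⟨k, h5k, hacck⟩
            have : pvDiagOuter pole "O" (min cols pole.length) 0 = false :=
              hdiag.mpr ⟨k, Nat.zero_le k, h5k, hacck⟩
            rw [hx] at this
            exact Bool.noConfusion this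
        simp only [List.getD_eq_getElem?_getD] at h1 h2 hblk
        simp [h1, h2, hblk, pvAnti_start]

def pvRect (d : List (List String)) (rn sn : Nat) : Prop :=
  d.length = rn ∧ ∀ row ∈ d, row.length = sn

lemma pvRect_setCell (d : List (List String)) (rn sn : Nat) (h : pvRect d rn sn)
    (i j : Nat) (hi : i < rn) (v : String) : pvRect (pvSetCell d i j v) rn sn := by
  obtain ⟨hl, hr⟩ := h
  constructor
  · simpa [pvSetCell] using hl
  · intro row hrow
    simp only [pvSetCell] at hrow
    rcases List.mem_or_eq_of_mem_set hrow with hmem | heq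
    · exact hr row hmem
    · subst heq
      rw [List.length_set]
      exact hr _ (by rw [List.getD_eq_getElem _ _ (by omega)]; exact List.getElem_mem (by omega))

lemma pv_inner_fold_eq (rn sn : Nat) (i : Int) (_hi : 0 ≤ i) (hilt : i.toNat < rn) :
    ∀ (js : List Int) (d : List (List String)), pvRect d rn sn →
      (∀ j ∈ js, 0 ≤ j ∧ j.toNat < sn) →
      (js.foldl (fun d j =>
          let d1 := pvSetCell d i.toNat j.toNat "O"
          if !(proverka d1 i j "O") then pvSetCell d1 i.toNat j.toNat "X" else d1) d
        = js.foldl (fun d j =>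
          let d1 := pvSetCell d i.toNat j.toNat "O"
          if pvBlocked d1 i j then pvSetCell d1 i.toNat j.toNat "X" else d1) d)
      ∧ pvRect (js.foldl (fun d j =>
          let d1 := pvSetCell d i.toNat j.toNat "O"
          if pvBlocked d1 i j then pvSetCell d1 i.toNat j.toNat "X" else d1) d) rn sn := by
  intro js
  induction js with
  | nil => exact fun d hd _ => ⟨rfl, hd⟩
  | cons j js ihl =>
    intro d hd hjs
    obtain ⟨hj0, hjlt⟩ := hjs j List.mem_cons_self
    have hd1 : pvRect (pvSetCell d i.toNat j.toNat "O") rn sn :=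
      pvRect_setCell d rn sn hd i.toNat j.toNat hilt "O"
    have hrnpos : 0 < rn := by omega
    have hcols : ((pvSetCell d i.toNat j.toNat "O").getD 0 []).length = sn := by
      apply hd1.2
      rw [List.getD_eq_getElem _ _ (by rw [hd1.1]; omega)]
      exact List.getElem_mem (by rw [hd1.1]; omega)
    have hpb := proverka_eq_not_blocked (pvSetCell d i.toNat j.toNat "O") i j sn hcols hd1.2
      (by rw [hd1.1]; exact hilt) hjlt
    have hstep : (let d1 := pvSetCell d i.toNat j.toNat "O"
        if !(proverka d1 i j "O") then pvSetCell d1 i.toNat j.toNat "X" else d1)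
        = (let d1 := pvSetCell d i.toNat j.toNat "O"
        if pvBlocked d1 i j then pvSetCell d1 i.toNat j.toNat "X" else d1) := by
      simp only [hpb, Bool.not_not]
    have hdnext : pvRect (let d1 := pvSetCell d i.toNat j.toNat "O"
        if pvBlocked d1 i j then pvSetCell d1 i.toNat j.toNat "X" else d1) rn sn := by
      simp only
      split
      · exact pvRect_setCell _ rn sn hd1 i.toNat j.toNat hilt "X"
      · exact hd1
    have hrest := ihl _ hdnext (fun x hx => hjs x (List.mem_cons_of_mem j hx))
    rw [List.foldl_cons, List.foldl_cons, hstep]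
    exact hrest

lemma pv_outer_fold_eq (rn sn : Nat) (s : Int) (hs : sn = s.toNat) :
    ∀ (is : List Int) (d : List (List String)), pvRect d rn sn →
      (∀ i ∈ is, 0 ≤ i ∧ i.toNat < rn) →
      is.foldl (fun d i =>
          (PySem.List.pyRange 0 s 1).foldl (fun d j =>
            let d1 := pvSetCell d i.toNat j.toNat "O"
            if !(proverka d1 i j "O") then pvSetCell d1 i.toNat j.toNat "X" else d1) d) d
        = is.foldl (fun d i =>
          (PySem.List.pyRange 0 s 1).foldl (fun d j =>
            let d1 := pvSetCell d i.toNat j.toNat "O"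
            if pvBlocked d1 i j then pvSetCell d1 i.toNat j.toNat "X" else d1) d) d := by
  intro is
  induction is with
  | nil => exact fun d _ _ => rfl
  | cons i is ihl =>
    intro d hd his
    obtain ⟨hi0, hilt⟩ := his i List.mem_cons_self
    have hjs : ∀ j ∈ PySem.List.pyRange 0 s 1, 0 ≤ j ∧ j.toNat < sn := by
      intro j hjmem
      rw [PySem.List.mem_pyRange_one] at hjmem
      omega
    have hinner := pv_inner_fold_eq rn sn i hi0 hilt (PySem.List.pyRange 0 s 1) d hd hjs
    rw [List.foldl_cons, List.foldl_cons, hinner.1]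
    exact ihl _ hinner.2 (fun x hx => his x (List.mem_cons_of_mem i hx))

-- ===== VERDICT (by name: the statement is the Claim_ definition above) =====
theorem remize_spec : Claim_equal_remize := by
  intro r s _
  show remize r s = remize_alt r s
  rw [remize, remize_alt]
  apply pv_outer_fold_eq r.toNat s.toNat s rfl
  · constructor
    · simp [PySem.List.length_pyRange_one]
    · intro row hrow
      rw [List.mem_map] at hrow
      obtain ⟨x, _, hx⟩ := hrow
      rw [← hx]
      simp [PySem.List.length_pyRange_one]
  · intro i hi
    rw [PySem.List.mem_pyRange_one] at hi
    omega
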